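-- pv_equiv track=rewrite | github.com/adpena/molt | bench/comprehensive_bench.py | control_exception_handling
-- ===== SOURCE A (Python) =====
-- def control_exception_handling(n):
--     """Try/except in a loop."""
--     count = 0
--     for i in range(n):
--         try:
--             if i % 1000 == 0:
--                 raise ValueError("test")
--         except ValueError:
--             count += 1
--     return count
-- ===== SOURCE B (Python) =====
-- def control_exception_handling(n):
--     """Closed form: count of multiples of 1000 in range(n) = ceil(n/1000) for n>0."""
--     return 0 if n <= 0 else (n + 999) // 1000
-- ===== Notes on version B (the rewrite author's own statement) =====
-- stated objective: faster
-- what changed: Replaced the O(n) loop (raising/catching an exception per multiple of 1000) with the closed form (n+999)//1000.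
import Mathlib
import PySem

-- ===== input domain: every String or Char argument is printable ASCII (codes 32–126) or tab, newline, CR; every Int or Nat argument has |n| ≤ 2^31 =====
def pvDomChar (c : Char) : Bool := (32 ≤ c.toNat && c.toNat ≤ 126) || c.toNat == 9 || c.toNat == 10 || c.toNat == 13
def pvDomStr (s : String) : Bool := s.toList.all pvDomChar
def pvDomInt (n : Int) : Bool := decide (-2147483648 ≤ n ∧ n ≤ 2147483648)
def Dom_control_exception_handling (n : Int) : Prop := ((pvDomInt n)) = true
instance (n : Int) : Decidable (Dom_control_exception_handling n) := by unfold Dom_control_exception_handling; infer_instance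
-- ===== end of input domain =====

-- B replaces A's O(n) loop with the closed form (n+999)//1000 (return value equivalence).
-- ===== PORT A =====
def control_exception_handling (n : Int) : Int :=
  (PySem.List.pyRange 0 n 1).foldl
    (fun count i => if PySem.Int.mod i 1000 == 0 then count + 1 else count) 0

-- ===== PORT B =====
def control_exception_handling_alt (n : Int) : Int :=
  if n ≤ 0 then 0 else PySem.Int.floordiv (n + 999) 1000

-- ===== PRECONDITION & SPEC =====
def Spec_control_exception_handling (n : Int) (out : Int) : Prop := out = control_exception_handling_alt n
instance (n : Int) (out : Int) : Decidable (Spec_control_exception_handling n out) := by unfold Spec_control_exception_handling; infer_instance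

-- ===== CLAIM (what is proved, stated in full; the proofs are below) =====
def Claim_equal_control_exception_handling : Prop := ∀ (n : Int), Dom_control_exception_handling n → Spec_control_exception_handling n (control_exception_handling n)

-- ===== LEMMAS AND PROOFS =====

-- ===== VERDICT (by name: the statement is the Claim_ definition above) =====
lemma ceh_loop (m : Nat) :
    (PySem.List.pyRange 0 (m : Int) 1).foldl
      (fun count i => if PySem.Int.mod i 1000 == 0 then count + 1 else count) 0
      = if (m : Int) ≤ 0 then 0 else ((m : Int) + 999) / 1000 := by
  induction m with
  | zero => simp
  | succ k ih =>
      rw [show ((k + 1 : Nat) : Int) = (k : Int) + 1 by push_cast; ring,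
        PySem.List.pyRange_one_succ_right (a := 0) (b := (k : Int)) (by exact_mod_cast Int.natCast_nonneg k),
        List.foldl_append, ih]
      simp only [List.foldl_cons, List.foldl_nil]
      rw [PySem.Int.mod_eq_emod_of_pos (by norm_num)]
      by_cases hd : (1000 : Int) ∣ (k : Int)
      · obtain ⟨q, hq⟩ := hd
        have hmodz : ((k : Int)) % 1000 = 0 := by omega
        simp only [hmodz, beq_self_eq_true, if_true]
        split_ifs with h1 h2 <;> omega
      · have hne : ((k : Int)) % 1000 ≠ 0 := by omega
        simp only [beq_iff_eq, hne, if_false]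
        split_ifs with h1 h2 <;> omega

theorem control_exception_handling_spec : Claim_equal_control_exception_handling := by
  intro n _
  unfold Spec_control_exception_handling control_exception_handling control_exception_handling_alt
  by_cases hn : n ≤ 0
  · rw [PySem.List.pyRange_one_eq_nil hn]
    simp [hn]
  · obtain ⟨m, hm⟩ : ∃ m : Nat, n = (m : Int) := ⟨n.toNat, by omega⟩
    subst hm
    rw [ceh_loop, PySem.Int.floordiv_eq_ediv_of_pos (by norm_num)]
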